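-- pv_equiv track=rewrite | github.com/vasylchenkoyehor/assignment6 | bitwise_operations.py | calculate_bitwise_operations
-- ===== SOURCE A (Python) =====
-- def calculate_bitwise_operations(numbers):
--     bitwise_and = numbers[0]
--     bitwise_or = numbers[0]
--     bitwise_xor = numbers[0]
--     for num in numbers[1:]:
--         bitwise_and &= num
--         bitwise_or |= num
--         bitwise_xor ^= num
--     return bitwise_and, bitwise_or, bitwise_xor
-- ===== SOURCE B (Python) =====
-- def calculate_bitwise_operations(numbers):
--     # divide-and-conquer tree reduction: split in half, reduce each half, combine
--     def go(seg):
--         if len(seg) == 1: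
--             x = seg[0]
--             return x, x, x
--         mid = len(seg) // 2
--         a1, o1, x1 = go(seg[:mid])
--         a2, o2, x2 = go(seg[mid:])
--         return a1 & a2, o1 | o2, x1 ^ x2
--     return go(numbers)
-- ===== Notes on version B (the rewrite author's own statement) =====
-- stated objective: alternative
-- what changed: Replaced A's single linear loop carrying three accumulators by a recursive divide-and-conquer tree reduction (split the list in half, reduce each half, combine the halves' AND/OR/XOR results); correct because &, |, ^ are associative.
import Mathlib
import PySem

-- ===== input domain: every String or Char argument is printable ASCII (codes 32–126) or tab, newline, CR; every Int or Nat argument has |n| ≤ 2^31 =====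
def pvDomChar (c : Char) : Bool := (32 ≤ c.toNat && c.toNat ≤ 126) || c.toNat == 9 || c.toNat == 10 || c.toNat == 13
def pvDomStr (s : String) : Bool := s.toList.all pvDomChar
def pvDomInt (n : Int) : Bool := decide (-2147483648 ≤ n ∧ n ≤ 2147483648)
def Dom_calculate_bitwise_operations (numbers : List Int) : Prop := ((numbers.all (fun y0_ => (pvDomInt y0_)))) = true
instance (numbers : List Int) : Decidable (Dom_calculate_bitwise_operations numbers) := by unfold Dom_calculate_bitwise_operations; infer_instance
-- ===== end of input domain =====

-- B replaces A's single linear three-accumulator loop by a divide-and-conquer tree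
-- reduction (halve the list, reduce each half, combine with &/|/^); alternative, same result.

-- ===== PORT A =====
-- one fused pass: triple accumulator seeded with numbers[0], folded over numbers[1:]
def calculate_bitwise_operations (numbers : List Int) : Int × Int × Int :=
  match numbers with
  | [] => (0, 0, 0)  -- Python raises IndexError here; excluded by Pre_
  | h :: t =>
    t.foldl (fun (s : Int × Int × Int) num =>
      (PySem.Int.band s.1 num, PySem.Int.bor s.2.1 num, PySem.Int.bxor s.2.2 num)) (h, h, h)

-- ===== PORT B =====
-- go(seg): singleton is the base case; otherwise split at len//2, recurse on both
-- halves, combine componentwise.  The [] branch is a totality base only (Python's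
-- go diverges on []; unreachable under Pre_).
def pvGoB : List Int → Int × Int × Int
  | [] => (0, 0, 0)
  | [x] => (x, x, x)
  | a :: b :: rest =>
    let seg := a :: b :: rest
    let mid := seg.length / 2
    let l := pvGoB (seg.take mid)
    let r := pvGoB (seg.drop mid)
    (PySem.Int.band l.1 r.1, PySem.Int.bor l.2.1 r.2.1, PySem.Int.bxor l.2.2 r.2.2)
termination_by seg => seg.length
decreasing_by
  · simp [List.length_take]; omega
  · simp; omega

def calculate_bitwise_operations_alt (numbers : List Int) : Int × Int × Int :=
  pvGoB numbers

-- ===== PRECONDITION & SPEC =====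
-- Pre_ excludes only the empty list, on which A raises IndexError (B's recursion also fails there).
def Pre_calculate_bitwise_operations (numbers : List Int) : Prop := numbers ≠ []
instance (numbers : List Int) : Decidable (Pre_calculate_bitwise_operations numbers) := by unfold Pre_calculate_bitwise_operations; infer_instance
def pvWitness_calculate_bitwise_operations : List Int := [6, 3, 5]

def Spec_calculate_bitwise_operations (numbers : List Int) (out : Int × Int × Int) : Prop := out = calculate_bitwise_operations_alt numbers
instance (numbers : List Int) (out : Int × Int × Int) : Decidable (Spec_calculate_bitwise_operations numbers out) := by unfold Spec_calculate_bitwise_operations; infer_instance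

-- ===== CLAIM =====
def Claim_equal_calculate_bitwise_operations : Prop := ∀ (numbers : List Int), Dom_calculate_bitwise_operations numbers → Pre_calculate_bitwise_operations numbers → Spec_calculate_bitwise_operations numbers (calculate_bitwise_operations numbers)

-- ===== LEMMAS AND PROOFS =====

-- If y is a bitwise submask of x, subtraction is bitwise xor.
theorem pv_sub_submask (x : Nat) : ∀ y : Nat, y &&& x = y → x - y = x ^^^ y := by
  induction x using Nat.strong_induction_on with
  | _ x ih =>
    intro y hsub
    rcases Nat.eq_zero_or_pos x with hx | hx
    · subst hx
      have hy : y = 0 := by simpa using hsub.symm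
      subst hy; simp
    · have h2 : y / 2 &&& x / 2 = y / 2 := by
        have := congrArg (· / 2) hsub
        simpa [Nat.and_div_two] using this
      have ihh := ih (x / 2) (Nat.div_lt_self hx (by norm_num)) (y / 2) h2
      have h12 : y / 2 ≤ x / 2 := by
        conv_lhs => rw [← h2]
        exact Nat.and_le_right
      have hone : (2:Nat) ^ 1 = 2 := by norm_num
      have hm : y % 2 = y % 2 &&& x % 2 := by
        conv_lhs => rw [← hsub]
        have := @Nat.and_mod_two_pow y x 1
        rwa [hone] at this
      have hxm : (x ^^^ y) % 2 = x % 2 ^^^ y % 2 := by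
        have := @Nat.xor_mod_two_pow x y 1
        rwa [hone] at this
      have hxd : (x ^^^ y) / 2 = x / 2 ^^^ y / 2 := Nat.xor_div_two
      have hxd2 : (x ^^^ y) / 2 = x / 2 - y / 2 := by rw [hxd, ← ihh]
      rcases Nat.mod_two_eq_zero_or_one y with hy | hy <;>
        rcases Nat.mod_two_eq_zero_or_one x with hx' | hx' <;>
          rw [hy, hx'] at hm <;>
          first
          | (exfalso; revert hm; decide)
          | (have hxm' : (x ^^^ y) % 2 = x % 2 - y % 2 := by
               rw [hxm, hy, hx']; decide
             omega)

theorem pv_testBit_sub_and (m n k : Nat) :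
    (m - (m &&& n)).testBit k = (m.testBit k && !(n.testBit k)) := by
  have hsub : (m &&& n) &&& m = m &&& n := by
    rw [Nat.and_comm m n, Nat.and_assoc, Nat.and_self]
  rw [pv_sub_submask m (m &&& n) hsub, Nat.testBit_xor, Nat.testBit_and]
  cases m.testBit k <;> cases n.testBit k <;> rfl

-- bit k of an Int in Python's infinite two's-complement reading
def pvBit (a : Int) (k : Nat) : Bool :=
  if 0 ≤ a then a.toNat.testBit k else !((-a - 1).toNat.testBit k)

theorem pvBit_natCast (u : Nat) (k : Nat) : pvBit (u : Int) k = u.testBit k := by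
  simp [pvBit]

theorem pvBit_negPart (u : Nat) (k : Nat) : pvBit (-(u : Int) - 1) k = !(u.testBit k) := by
  have h1 : ¬ (0 : Int) ≤ -(u : Int) - 1 := by omega
  have h2 : (-(-(u : Int) - 1) - 1) = (u : Int) := by ring
  rw [pvBit, if_neg h1, h2, Int.toNat_natCast]

theorem pvBit_ext (a b : Int) (h : ∀ k, pvBit a k = pvBit b k) : a = b := by
  by_cases ha : 0 ≤ a <;> by_cases hb : 0 ≤ b
  · have : a.toNat = b.toNat := Nat.eq_of_testBit_eq (fun k => by
      have := h k; simpa [pvBit, ha, hb] using this)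
    omega
  · exfalso
    have hk := h (a.toNat + (-b - 1).toNat)
    have e1 : a.toNat.testBit (a.toNat + (-b - 1).toNat) = false :=
      Nat.testBit_lt_two_pow
        (lt_of_lt_of_le Nat.lt_two_pow_self (Nat.pow_le_pow_right (by norm_num) (by omega)))
    have e2 : (-b - 1).toNat.testBit (a.toNat + (-b - 1).toNat) = false :=
      Nat.testBit_lt_two_pow
        (lt_of_lt_of_le Nat.lt_two_pow_self (Nat.pow_le_pow_right (by norm_num) (by omega)))
    rw [pvBit, pvBit, if_pos ha, if_neg hb, e1, e2] at hk
    exact Bool.false_ne_true hk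
  · exfalso
    have hk := h (b.toNat + (-a - 1).toNat)
    have e1 : b.toNat.testBit (b.toNat + (-a - 1).toNat) = false :=
      Nat.testBit_lt_two_pow
        (lt_of_lt_of_le Nat.lt_two_pow_self (Nat.pow_le_pow_right (by norm_num) (by omega)))
    have e2 : (-a - 1).toNat.testBit (b.toNat + (-a - 1).toNat) = false :=
      Nat.testBit_lt_two_pow
        (lt_of_lt_of_le Nat.lt_two_pow_self (Nat.pow_le_pow_right (by norm_num) (by omega)))
    rw [pvBit, pvBit, if_neg ha, if_pos hb, e1, e2] at hk
    exact Bool.false_ne_true hk.symm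
  · have : (-a - 1).toNat = (-b - 1).toNat := Nat.eq_of_testBit_eq (fun k => by
      have := h k; simpa [pvBit, ha, hb] using this)
    omega

theorem pvBit_band (a b : Int) (k : Nat) :
    pvBit (PySem.Int.band a b) k = (pvBit a k && pvBit b k) := by
  unfold PySem.Int.band
  by_cases ha : 0 ≤ a <;> by_cases hb : 0 ≤ b <;>
    simp only [ha, hb, if_true, if_false, pvBit_natCast, pvBit_negPart]
  · simp [pvBit, ha, hb, Nat.testBit_and]
  · simp [pvBit, ha, hb, pv_testBit_sub_and]
  · simp [pvBit, ha, hb, pv_testBit_sub_and, Bool.and_comm]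
  · simp [pvBit, ha, hb, Nat.testBit_or]

theorem pvBit_bor (a b : Int) (k : Nat) :
    pvBit (PySem.Int.bor a b) k = (pvBit a k || pvBit b k) := by
  unfold PySem.Int.bor
  by_cases ha : 0 ≤ a <;> by_cases hb : 0 ≤ b <;>
    simp only [ha, hb, if_true, if_false, pvBit_natCast, pvBit_negPart]
  · simp [pvBit, ha, hb, Nat.testBit_or]
  · simp [pvBit, ha, hb, pv_testBit_sub_and, Bool.or_comm]
  · simp [pvBit, ha, hb, pv_testBit_sub_and, Bool.or_comm]
  · simp [pvBit, ha, hb, Nat.testBit_and]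

theorem pvBit_bxor (a b : Int) (k : Nat) :
    pvBit (PySem.Int.bxor a b) k = ((pvBit a k).xor (pvBit b k)) := by
  unfold PySem.Int.bxor
  by_cases ha : 0 ≤ a <;> by_cases hb : 0 ≤ b <;>
    simp only [ha, hb, if_true, if_false, pvBit_natCast, pvBit_negPart]
  · simp [pvBit, ha, hb, Nat.testBit_xor]
  · simp [pvBit, ha, hb, Nat.testBit_xor]
  · simp [pvBit, ha, hb, Nat.testBit_xor]
  · simp [pvBit, ha, hb, Nat.testBit_xor]

theorem pv_band_assoc (a b c : Int) :
    PySem.Int.band (PySem.Int.band a b) c = PySem.Int.band a (PySem.Int.band b c) :=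
  pvBit_ext _ _ (fun k => by simp [pvBit_band, Bool.and_assoc])

theorem pv_bor_assoc (a b c : Int) :
    PySem.Int.bor (PySem.Int.bor a b) c = PySem.Int.bor a (PySem.Int.bor b c) :=
  pvBit_ext _ _ (fun k => by simp [pvBit_bor, Bool.or_assoc])

theorem pv_bxor_assoc (a b c : Int) :
    PySem.Int.bxor (PySem.Int.bxor a b) c = PySem.Int.bxor a (PySem.Int.bxor b c) :=
  pvBit_ext _ _ (fun k => by simp [pvBit_bxor])

-- folds of an associative op: pull a left argument out
theorem pv_foldl_shift (op : Int → Int → Int)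
    (hop : ∀ a b c, op (op a b) c = op a (op b c)) :
    ∀ (t : List Int) (a b : Int), t.foldl op (op a b) = op a (t.foldl op b) := by
  intro t
  induction t with
  | nil => intro a b; rfl
  | cons x xs ih => intro a b; simp only [List.foldl]; rw [hop, ih]

theorem pv_foldl_combine (op : Int → Int → Int)
    (hop : ∀ a b c, op (op a b) c = op a (op b c))
    (t1 : List Int) (h1 h2 : Int) (t2 : List Int) :
    (t1 ++ h2 :: t2).foldl op h1 = op (t1.foldl op h1) (t2.foldl op h2) := by
  rw [List.foldl_append]
  simp only [List.foldl]
  exact pv_foldl_shift op hop t2 (t1.foldl op h1) h2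

-- A's fused triple fold splits into three independent folds
theorem pv_fused_eq_triple (t : List Int) (a b c : Int) :
    t.foldl (fun (s : Int × Int × Int) num =>
      (PySem.Int.band s.1 num, PySem.Int.bor s.2.1 num, PySem.Int.bxor s.2.2 num)) (a, b, c)
      = (t.foldl PySem.Int.band a, t.foldl PySem.Int.bor b, t.foldl PySem.Int.bxor c) := by
  induction t generalizing a b c with
  | nil => rfl
  | cons x xs ih =>
    simp only [List.foldl]
    exact ih (PySem.Int.band a x) (PySem.Int.bor b x) (PySem.Int.bxor c x)

-- the tree reduction computes the three left folds
theorem pvGoB_eq : ∀ (n : Nat) (h : Int) (t : List Int), t.length ≤ n →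
    pvGoB (h :: t) = (t.foldl PySem.Int.band h, t.foldl PySem.Int.bor h, t.foldl PySem.Int.bxor h) := by
  intro n
  induction n with
  | zero =>
    intro h t hle
    have : t = [] := List.eq_nil_of_length_eq_zero (by omega)
    subst this; simp [pvGoB]
  | succ n ih =>
    intro h t hle
    match t with
    | [] => simp [pvGoB]
    | t1 :: t2 =>
      rw [pvGoB]
      set mid := (h :: t1 :: t2).length / 2 with hm
      have hlen : (h :: t1 :: t2).length = t2.length + 2 := by simp
      have hmid1 : 1 ≤ mid := by rw [hm, hlen]; omega
      have hmidlt : mid < t2.length + 2 := by rw [hm, hlen]; omega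
      obtain ⟨k, hk⟩ : ∃ k, mid = k + 1 := ⟨mid - 1, by omega⟩
      have htake : (h :: t1 :: t2).take mid = h :: (t1 :: t2).take k := by
        rw [hk]; simp
      have hdropk : ((t1 :: t2).drop k).length = t2.length + 1 - k := by simp
      have hkd : k < (t1 :: t2).length := by simp; omega
      obtain ⟨h2, t2', hd⟩ : ∃ h2 t2', (t1 :: t2).drop k = h2 :: t2' := by
        cases hdk : (t1 :: t2).drop k with
        | nil => exfalso; have := List.drop_eq_nil_iff.mp hdk; simp at this; omega
        | cons x xs => exact ⟨x, xs, rfl⟩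
      have hdrop : (h :: t1 :: t2).drop mid = h2 :: t2' := by
        rw [hk]; simpa using hd
      have hsplit : (t1 :: t2) = (t1 :: t2).take k ++ (h2 :: t2') := by
        rw [← hd, List.take_append_drop]
      have hlk : ((t1 :: t2).take k).length ≤ n := by
        simp [List.length_take]; omega
      have hl2 : t2'.length ≤ n := by
        have hx1 : t2'.length + 1 = t2.length + 1 - k := by
          rw [← hdropk, hd]; simp
        have hx2 : t2.length + 1 ≤ n + 1 := by simpa using hle
        omega
      rw [htake, hdrop, ih h ((t1 :: t2).take k) hlk, ih h2 t2' hl2]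
      simp only []
      refine Prod.ext ?_ (Prod.ext ?_ ?_)
      · show PySem.Int.band _ _ = (t1 :: t2).foldl PySem.Int.band h
        conv_rhs => rw [hsplit]
        rw [pv_foldl_combine _ pv_band_assoc]
      · show PySem.Int.bor _ _ = (t1 :: t2).foldl PySem.Int.bor h
        conv_rhs => rw [hsplit]
        rw [pv_foldl_combine _ pv_bor_assoc]
      · show PySem.Int.bxor _ _ = (t1 :: t2).foldl PySem.Int.bxor h
        conv_rhs => rw [hsplit]
        rw [pv_foldl_combine _ pv_bxor_assoc]

-- ===== VERDICT =====
theorem calculate_bitwise_operations_spec : Claim_equal_calculate_bitwise_operations := by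
  intro numbers _ hpre
  unfold Spec_calculate_bitwise_operations calculate_bitwise_operations_alt
  cases numbers with
  | nil => exact absurd rfl hpre
  | cons h t =>
    rw [pvGoB_eq t.length h t (le_refl _)]
    simp [calculate_bitwise_operations, pv_fused_eq_triple]
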